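-- pv_equiv track=rewrite | github.com/PetIQ-llc/snowflake_catalog_tags-develop | modules/generate_sql.py | generate_create_tag_statements
-- ===== SOURCE A (Python) =====
-- from typing import Dict, List, Tuple, Set
--
-- def format_snowflake_identifier(name: str) -> str:
--     """
--     Format an identifier for Snowflake (uppercase and replace spaces with underscores)
--
--     Args:
--         name: Original name
--
--     Returns:
--         Formatted identifier suitable for Snowflake
--     """
--     return name.replace(" ", "_").replace("-", "_").upper()
--
-- def generate_create_tag_statements(all_tags: Set[Tuple[str, str]]) -> List[str]:
--     """
--     Generate CREATE TAG statements for all unique tag keys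
--
--     Args:
--         all_tags: Set of unique (key, value) tuples
--
--     Returns:
--         List of CREATE TAG statements
--     """
--     statements = []
--
--     # Group tags by key
--     tag_keys = {}
--     for key, value in all_tags:
--         if key not in tag_keys:
--             tag_keys[key] = []
--         tag_keys[key].append(value)
--
--     statements.append("-- ============================================================")
--     statements.append("-- CREATE TAG statements")
--     statements.append("-- These tags must exist in Snowflake before applying to objects")
--     statements.append("-- ============================================================")
--     statements.append("")
--
--     for key in sorted(tag_keys.keys()):
--         tag_name = format_snowflake_identifier(key)
--         values = sorted(set(tag_keys[key]))
--
--         statements.append(f"-- Tag: {tag_name}")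
--         statements.append(f"-- Values found in catalog: {', '.join(values)}")
--         statements.append(f"CREATE TAG IF NOT EXISTS {tag_name}")
--         statements.append(f"    COMMENT = 'Tag imported from catalog with key: {key}';")
--         statements.append("")
--
--     return statements
-- ===== SOURCE B (Python) =====
-- from itertools import groupby
--
-- def _format_identifier(name: str) -> str:
--     return name.replace(" ", "_").replace("-", "_").upper()
--
-- def generate_create_tag_statements(all_tags):
--     statements = [
--         "-- ============================================================",
--         "-- CREATE TAG statements",
--         "-- These tags must exist in Snowflake before applying to objects",
--         "-- ============================================================",
--         "",
--     ]
--     # one sort of the deduplicated pairs; consecutive runs share a key and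
--     # their values arrive already sorted and distinct
--     for key, group in groupby(sorted(set(all_tags)), key=lambda kv: kv[0]):
--         values = [v for _, v in group]
--         tag_name = _format_identifier(key)
--         statements += [
--             f"-- Tag: {tag_name}",
--             f"-- Values found in catalog: {', '.join(values)}",
--             f"CREATE TAG IF NOT EXISTS {tag_name}",
--             f"    COMMENT = 'Tag imported from catalog with key: {key}';",
--             "",
--         ]
--     return statements
-- ===== Notes on version B (the rewrite author's own statement) =====
-- stated objective: idiomatic
-- what changed: Instead of indexing values into a dict keyed by tag and then sorting the keys and each value set separately, B deduplicates and sorts the (key, value) pairs once (tuples sort by key then value) and walks the consecutive runs with itertools.groupby, each run already yielding the key's distinct values in sorted order.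
import Mathlib
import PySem

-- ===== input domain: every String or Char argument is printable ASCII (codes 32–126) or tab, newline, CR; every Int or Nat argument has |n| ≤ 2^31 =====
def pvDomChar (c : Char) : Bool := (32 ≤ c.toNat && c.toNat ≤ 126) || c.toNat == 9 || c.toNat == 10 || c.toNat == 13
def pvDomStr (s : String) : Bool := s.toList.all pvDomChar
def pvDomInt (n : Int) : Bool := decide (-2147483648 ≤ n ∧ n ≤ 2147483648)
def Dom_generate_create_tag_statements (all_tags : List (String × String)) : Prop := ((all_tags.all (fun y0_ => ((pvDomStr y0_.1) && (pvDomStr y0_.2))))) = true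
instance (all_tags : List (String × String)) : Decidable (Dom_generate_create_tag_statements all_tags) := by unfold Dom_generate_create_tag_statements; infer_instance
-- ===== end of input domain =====

-- A builds a dict key→values then sorts keys and each value set; B sorts the deduplicated
-- pairs once and walks consecutive runs sharing a key (idiomatic groupby decomposition).


-- ===== PORT A =====
def format_snowflake_identifier (name : String) : String :=
  PySem.Str.upper (PySem.Str.replace (PySem.Str.replace name " " "_") "-" "_")

def generate_create_tag_statements (all_tags : List (String × String)) : List String :=
  let statements : List String := []
  -- for key, value in all_tags: if key not in tag_keys: tag_keys[key] = []; tag_keys[key].append(value)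
  let tag_keys : PySem.Dict String (List String) :=
    all_tags.foldl (fun tag_keys kv =>
      let tag_keys := if tag_keys.contains kv.1 then tag_keys else tag_keys.insert kv.1 []
      tag_keys.modify kv.1 [] (fun vs => vs ++ [kv.2])) PySem.Dict.empty
  let statements := statements ++ ["-- ============================================================"]
  let statements := statements ++ ["-- CREATE TAG statements"]
  let statements := statements ++ ["-- These tags must exist in Snowflake before applying to objects"]
  let statements := statements ++ ["-- ============================================================"]
  let statements := statements ++ [""]
  let statements :=
    (PySem.List.sorted tag_keys.keys (fun k => k)).foldl (fun statements key =>
      let tag_name := format_snowflake_identifier key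
      let values := PySem.List.sorted (PySem.Set.ofList (tag_keys.getD key [])) (fun v => v)
      statements ++
        ["-- Tag: " ++ tag_name,
         "-- Values found in catalog: " ++ PySem.Str.join ", " values,
         "CREATE TAG IF NOT EXISTS " ++ tag_name,
         "    COMMENT = 'Tag imported from catalog with key: " ++ key ++ "';",
         ""]) statements
  statements

-- ===== PORT B =====
-- Source B's _format_identifier computes the same formatter; ported as the shared definition above
-- itertools.groupby over the key component: consecutive runs sharing a key, with the run's values.
def pvGroupRuns : List (String × String) → List (String × List String)
  | [] => []
  | (k, v) :: rest =>
    (k, v :: (rest.takeWhile (fun p => p.1 == k)).map (fun p => p.2)) ::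
      pvGroupRuns (rest.dropWhile (fun p => p.1 == k))
termination_by l => l.length
decreasing_by
  simpa using Nat.lt_succ_of_le (List.Sublist.length_le (List.dropWhile_sublist _))

def generate_create_tag_statements_alt (all_tags : List (String × String)) : List String :=
  ["-- ============================================================",
   "-- CREATE TAG statements",
   "-- These tags must exist in Snowflake before applying to objects",
   "-- ============================================================",
   ""] ++
  (pvGroupRuns (PySem.List.sorted2 (PySem.Set.ofList all_tags) (fun p => p.1) (fun p => p.2))).flatMap
    (fun g =>
      let values := g.2
      let tag_name := format_snowflake_identifier g.1
      ["-- Tag: " ++ tag_name,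
       "-- Values found in catalog: " ++ PySem.Str.join ", " values,
       "CREATE TAG IF NOT EXISTS " ++ tag_name,
       "    COMMENT = 'Tag imported from catalog with key: " ++ g.1 ++ "';",
       ""])

-- ===== PRECONDITION & SPEC =====
def Spec_generate_create_tag_statements (all_tags : List (String × String)) (out : List String) : Prop := out = generate_create_tag_statements_alt all_tags
instance (all_tags : List (String × String)) (out : List String) : Decidable (Spec_generate_create_tag_statements all_tags out) := by unfold Spec_generate_create_tag_statements; infer_instance

-- ===== CLAIM (what is proved, stated in full; the proofs are below) =====
def Claim_equal_generate_create_tag_statements : Prop := ∀ (all_tags : List (String × String)), Dom_generate_create_tag_statements all_tags → Spec_generate_create_tag_statements all_tags (generate_create_tag_statements all_tags)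

-- ===== LEMMAS AND PROOFS =====


-- lexicographic order on pairs of strings, as Python compares (key, value) tuples
def pvLexLe (a b : String × String) : Prop := a.1 < b.1 ∨ (a.1 = b.1 ∧ a.2 ≤ b.2)
def pvLexLt (a b : String × String) : Prop := a.1 < b.1 ∨ (a.1 = b.1 ∧ a.2 < b.2)

def pvBefore (a b : String × String) : Bool :=
  decide (a.1 < b.1) || (!decide (b.1 < a.1) && decide (a.2 < b.2))

lemma pvSorted2_eq (xs : List (String × String)) :
    PySem.List.sorted2 xs (fun p => p.1) (fun p => p.2) =
      xs.foldl (fun acc x => PySem.List.insertBy pvBefore x acc) [] := rfl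

lemma pvBefore_true {a b : String × String} (h : pvBefore a b = true) : pvLexLe a b := by
  simp only [pvBefore, Bool.or_eq_true, Bool.and_eq_true, Bool.not_eq_true',
    decide_eq_true_eq, decide_eq_false_iff_not] at h
  rcases h with h | ⟨h1, h2⟩
  · exact Or.inl h
  · rcases lt_or_eq_of_le (not_lt.mp h1) with h | h
    · exact Or.inl h
    · exact Or.inr ⟨h, le_of_lt h2⟩

lemma pvBefore_false {a b : String × String} (h : pvBefore a b = false) : pvLexLe b a := by
  simp only [pvBefore, Bool.or_eq_false_iff, Bool.and_eq_false_iff, Bool.not_eq_false',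
    decide_eq_false_iff_not, decide_eq_true_eq] at h
  obtain ⟨h1, h2⟩ := h
  rcases lt_or_eq_of_le (not_lt.mp h1) with h | h
  · exact Or.inl h
  · refine Or.inr ⟨h, ?_⟩
    rcases h2 with h2 | h2
    · exact absurd h2 (by simp [h])
    · exact not_lt.mp h2

lemma pvLexLe_trans {a b c : String × String} (h1 : pvLexLe a b) (h2 : pvLexLe b c) : pvLexLe a c := by
  rcases h1 with h1 | ⟨h1, h1'⟩ <;> rcases h2 with h2 | ⟨h2, h2'⟩
  · exact Or.inl (lt_trans h1 h2)
  · exact Or.inl (h2 ▸ h1)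
  · exact Or.inl (h1 ▸ h2)
  · exact Or.inr ⟨h1.trans h2, h1'.trans h2'⟩

lemma pvInsertBy_pairwise (x : String × String) (ys : List (String × String))
    (h : ys.Pairwise pvLexLe) : (PySem.List.insertBy pvBefore x ys).Pairwise pvLexLe := by
  induction ys with
  | nil => simp [PySem.List.insertBy]
  | cons y ys ih =>
    rw [PySem.List.insertBy.eq_2]
    rcases List.pairwise_cons.1 h with ⟨hy, hys⟩
    by_cases hb : pvBefore x y = true
    · simp only [hb, if_true]
      refine List.pairwise_cons.2 ⟨?_, h⟩
      intro z hz
      rcases List.mem_cons.1 hz with rfl | hz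
      · exact pvBefore_true hb
      · exact pvLexLe_trans (pvBefore_true hb) (hy z hz)
    · simp only [hb, Bool.false_eq_true, if_false]
      refine List.pairwise_cons.2 ⟨?_, ih hys⟩
      intro z hz
      rcases (PySem.List.mem_insertBy _ _ _ _).1 hz with rfl | hz
      · exact pvBefore_false (Bool.eq_false_iff.2 hb)
      · exact hy z hz

lemma pvFoldl_insertBy_pairwise (xs acc : List (String × String))
    (hacc : acc.Pairwise pvLexLe) :
    (xs.foldl (fun acc x => PySem.List.insertBy pvBefore x acc) acc).Pairwise pvLexLe := by
  induction xs generalizing acc with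
  | nil => exact hacc
  | cons x xs ih => exact ih _ (pvInsertBy_pairwise x acc hacc)

lemma pvSorted2_pairwise (xs : List (String × String)) :
    (PySem.List.sorted2 xs (fun p => p.1) (fun p => p.2)).Pairwise pvLexLe := by
  rw [pvSorted2_eq]
  exact pvFoldl_insertBy_pairwise xs [] (List.Pairwise.nil)

lemma pvS_pairwise_lt (all_tags : List (String × String)) :
    (PySem.List.sorted2 (PySem.Set.ofList all_tags) (fun p => p.1) (fun p => p.2)).Pairwise pvLexLt := by
  have h1 := pvSorted2_pairwise (PySem.Set.ofList all_tags)
  have h2 : (PySem.List.sorted2 (PySem.Set.ofList all_tags) (fun p => p.1) (fun p => p.2)).Nodup :=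
    (PySem.List.sorted2_perm _ _ _ _).nodup_iff.2 (PySem.Set.nodup_ofList all_tags)
  refine (h1.and h2).imp ?_
  rintro a b ⟨hle, hne⟩
  rcases hle with h | ⟨h1', h2'⟩
  · exact Or.inl h
  · refine Or.inr ⟨h1', lt_of_le_of_ne h2' ?_⟩
    intro hsnd
    exact hne (Prod.ext h1' hsnd)

-- the run decomposition of a lex-sorted list, keyed by any strictly increasing list of its keys
lemma pvGroupRuns_eq (S : List (String × String)) (K : List String)
    (hS : S.Pairwise pvLexLt) (hK : K.Pairwise (· < ·))
    (hmem : ∀ k, k ∈ K ↔ k ∈ S.map Prod.fst) :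
    pvGroupRuns S = K.map (fun k => (k, (S.filter (fun p => p.1 == k)).map Prod.snd)) := by
  induction S using pvGroupRuns.induct generalizing K with
  | case1 =>
    have : K = [] := by
      cases K with
      | nil => rfl
      | cons k K' => exact absurd ((hmem k).1 (List.mem_cons_self)) (by simp)
    subst this; simp [pvGroupRuns]
  | case2 k v rest ih =>
    have hhead : ∀ p ∈ rest, pvLexLt (k, v) p := (List.pairwise_cons.1 hS).1
    have hrestp : rest.Pairwise pvLexLt := (List.pairwise_cons.1 hS).2
    have htk : ∀ p ∈ rest.takeWhile (fun p => p.1 == k), p.1 = k :=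
      fun p hp => by simpa using List.mem_takeWhile_imp hp
    have hdk : ∀ p ∈ rest.dropWhile (fun (p : String × String) => p.1 == k), k < p.1 := by
      cases hd : rest.dropWhile (fun (p : String × String) => p.1 == k) with
      | nil => simp
      | cons p0 d' =>
        have hne : rest.dropWhile (fun (p : String × String) => p.1 == k) ≠ [] := by simp [hd]
        have hp0 : ((rest.dropWhile (fun (p : String × String) => p.1 == k)).head hne).1 ≠ k := by
          simpa using List.head_dropWhile_not (fun (p : String × String) => p.1 == k) hne
        have hp0h : (rest.dropWhile (fun (p : String × String) => p.1 == k)).head hne = p0 := by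
          simp [hd]
        rw [hp0h] at hp0
        have hp0mem : p0 ∈ rest := (List.dropWhile_sublist _).mem (by rw [hd]; exact List.mem_cons_self)
        have hkp0 : k < p0.1 := by
          rcases hhead p0 hp0mem with h | ⟨h, _⟩
          · exact h
          · exact absurd h.symm hp0
        have hpair : (p0 :: d').Pairwise pvLexLt := by
          rw [← hd]; exact List.Pairwise.sublist (List.dropWhile_sublist _) hrestp
        intro p hp
        rcases List.mem_cons.1 hp with rfl | hp
        · exact hkp0
        · rcases (List.pairwise_cons.1 hpair).1 p hp with h | ⟨h, _⟩
          · exact lt_trans hkp0 h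
          · exact h ▸ hkp0
    -- K starts with k
    obtain ⟨K', rfl⟩ : ∃ K', K = k :: K' := by
      cases K with
      | nil =>
        exact absurd ((hmem k).2 (by simp)) (by simp)
      | cons k0 K' =>
        refine ⟨K', ?_⟩
        have hk0mem : k0 ∈ ((k, v) :: rest).map Prod.fst := (hmem k0).1 List.mem_cons_self
        have hkk0 : k ≤ k0 := by
          rcases List.mem_cons.1 hk0mem with h | h
          · exact le_of_eq h.symm
          · obtain ⟨p, hp, rfl⟩ := List.mem_map.1 h
            rcases hhead p hp with h' | ⟨h', _⟩
            · exact le_of_lt h'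
            · exact le_of_eq h'
        have hk0k : k0 = k := by
          rcases List.mem_cons.1 ((hmem k).2 (by simp)) with h | h
          · exact h.symm
          · exact absurd ((List.pairwise_cons.1 hK).1 k h) (not_lt.2 hkk0)
        rw [hk0k]
    -- unfold one step of pvGroupRuns
    rw [pvGroupRuns]
    have hKk : ∀ k' ∈ K', k < k' := (List.pairwise_cons.1 hK).1
    have hfilterk :
        (((k, v) :: rest).filter (fun p => p.1 == k)).map Prod.snd
          = v :: (rest.takeWhile (fun p => p.1 == k)).map (fun p => p.2) := by
      have hr : rest = rest.takeWhile (fun p => p.1 == k) ++ rest.dropWhile (fun p => p.1 == k) :=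
        (List.takeWhile_append_dropWhile).symm
      rw [List.filter_cons]
      simp only [beq_self_eq_true, if_true]
      conv_lhs => rw [hr]
      rw [List.filter_append]
      have h1 : (rest.takeWhile (fun p => p.1 == k)).filter (fun p => p.1 == k)
          = rest.takeWhile (fun p => p.1 == k) :=
        List.filter_eq_self.2 (fun p hp => by simp [htk p hp])
      have h2 : (rest.dropWhile (fun p => p.1 == k)).filter (fun p => p.1 == k) = [] :=
        List.filter_eq_nil_iff.2 (fun p hp => by simp [ne_of_gt (hdk p hp)])
      rw [h1, h2, List.append_nil]
      rfl
    have hih : pvGroupRuns (rest.dropWhile (fun p => p.1 == k))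
        = K'.map (fun k' => (k', ((rest.dropWhile (fun p => p.1 == k)).filter
            (fun p => p.1 == k')).map Prod.snd)) := by
      refine ih K' (List.Pairwise.sublist (List.dropWhile_sublist _) hrestp) (List.pairwise_cons.1 hK).2 ?_
      intro k'
      constructor
      · intro hk'
        have hkk' : k < k' := hKk k' hk'
        have : k' ∈ ((k, v) :: rest).map Prod.fst := (hmem k').1 (List.mem_cons_of_mem _ hk')
        rcases List.mem_cons.1 this with h | h
        · exact absurd h (by simpa using hkk'.ne')
        · obtain ⟨p, hp, rfl⟩ := List.mem_map.1 h
          have hr : rest = rest.takeWhile (fun p => p.1 == k) ++ rest.dropWhile (fun p => p.1 == k) :=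
            (List.takeWhile_append_dropWhile).symm
          rw [hr] at hp
          rcases List.mem_append.1 hp with h' | h'
          · exact absurd (htk p h') (ne_of_gt hkk')
          · exact List.mem_map.2 ⟨p, h', rfl⟩
      · intro hk'
        obtain ⟨p, hp, rfl⟩ := List.mem_map.1 hk'
        have hmem' : p.1 ∈ ((k, v) :: rest).map Prod.fst :=
          List.mem_map.2 ⟨p, List.mem_cons_of_mem _ (List.Sublist.mem hp (List.dropWhile_sublist _)), rfl⟩
        rcases List.mem_cons.1 ((hmem p.1).2 hmem') with h | h
        · exact absurd h (ne_of_gt (hdk p hp))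
        · exact h
    rw [hih, List.map_cons]
    congr 1
    · rw [hfilterk]
    · refine List.map_congr_left ?_
      intro k' hk'
      have hkk' : k < k' := hKk k' hk'
      congr 1
      have hr : rest = rest.takeWhile (fun p => p.1 == k) ++ rest.dropWhile (fun p => p.1 == k) :=
        (List.takeWhile_append_dropWhile).symm
      conv_rhs => rw [hr]
      rw [List.filter_cons, List.filter_append]
      have h0 : ((k, v).1 == k') = false := by simp [ne_of_lt hkk']
      have h1 : (rest.takeWhile (fun p => p.1 == k)).filter (fun p => p.1 == k') = [] :=
        List.filter_eq_nil_iff.2 (fun p hp => by simp [htk p hp, ne_of_lt hkk'])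
      simp [h0, h1]

-- the dict-building loop of A is the pure modify-fold the library characterises
lemma pvDictStep_eq (all_tags : List (String × String)) :
    all_tags.foldl (fun tag_keys kv =>
        let tag_keys := if tag_keys.contains kv.1 then tag_keys else tag_keys.insert kv.1 []
        tag_keys.modify kv.1 [] (fun vs => vs ++ [kv.2])) PySem.Dict.empty
      = all_tags.foldl (fun d p => d.modify p.1 [] (fun vs => vs ++ [p.2])) PySem.Dict.empty := by
  have hstep : (fun (tag_keys : PySem.Dict String (List String)) (kv : String × String) =>
      let tag_keys := if tag_keys.contains kv.1 then tag_keys else tag_keys.insert kv.1 []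
      tag_keys.modify kv.1 [] (fun vs => vs ++ [kv.2]))
      = fun (d : PySem.Dict String (List String)) (p : String × String) =>
          d.modify p.1 [] (fun vs => vs ++ [p.2]) := by
    funext d p
    by_cases h : d.contains p.1 = true
    · simp [h]
    · have h' : d.contains p.1 = false := Bool.eq_false_iff.2 h
      simp only [h', Bool.false_eq_true, if_false, PySem.Dict.modify]
      rw [PySem.Dict.getD_insert_self, PySem.Dict.getD_of_not_contains d _ h',
        PySem.Dict.insert_insert_self]
  rw [hstep]


lemma pvSmem (all_tags : List (String × String)) (p : String × String) :
    p ∈ PySem.List.sorted2 (PySem.Set.ofList all_tags) (fun p => p.1) (fun p => p.2) ↔ p ∈ all_tags :=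
  ((PySem.List.sorted2_perm _ _ _ _).mem_iff).trans (PySem.Set.mem_ofList _ _)

-- the values A sorts per key are exactly the run values B reads off the sorted pairs
lemma pvValues_eq (all_tags : List (String × String)) (k : String) :
    PySem.List.sorted
        (PySem.Set.ofList ((all_tags.filter (fun p => p.1 == k)).map Prod.snd)) (fun v => v)
      = ((PySem.List.sorted2 (PySem.Set.ofList all_tags) (fun p => p.1) (fun p => p.2)).filter
          (fun p => p.1 == k)).map Prod.snd := by
  have hfilter : ((PySem.List.sorted2 (PySem.Set.ofList all_tags) (fun p => p.1)
      (fun p => p.2)).filter (fun p => p.1 == k)).Pairwise pvLexLt :=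
    List.Pairwise.sublist List.filter_sublist (pvS_pairwise_lt all_tags)
  have hsnd : (((PySem.List.sorted2 (PySem.Set.ofList all_tags) (fun p => p.1)
      (fun p => p.2)).filter (fun p => p.1 == k)).map Prod.snd).Pairwise (· < ·) := by
    refine List.pairwise_map.2 (hfilter.imp_of_mem ?_)
    intro a b ha hb hab
    have ha' : a.1 = k := by simpa using List.of_mem_filter ha
    have hb' : b.1 = k := by simpa using List.of_mem_filter hb
    rcases hab with h | ⟨_, h⟩
    · rw [ha', hb'] at h; exact absurd h (lt_irrefl k)
    · exact h
  apply PySem.List.sorted_eq_of_perm_of_pairwise_lt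
  · refine (List.perm_ext_iff_of_nodup (hsnd.imp (fun h => ne_of_lt h))
      (PySem.Set.nodup_ofList _)).2 ?_
    intro v
    simp only [List.mem_map, List.mem_filter, PySem.Set.mem_ofList, pvSmem all_tags]
  · exact hsnd

lemma pvUpdate_nil_eq_ofList (l : List String) :
    PySem.Set.update ([] : List String) l = PySem.Set.ofList l := rfl

theorem pvMain (all_tags : List (String × String)) :
    generate_create_tag_statements all_tags = generate_create_tag_statements_alt all_tags := by
  simp only [generate_create_tag_statements, generate_create_tag_statements_alt]
  rw [pvDictStep_eq]
  rw [pvGroupRuns_eq (PySem.List.sorted2 (PySem.Set.ofList all_tags) (fun p => p.1) (fun p => p.2))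
        (PySem.List.sorted (PySem.Set.ofList (all_tags.map (fun p => p.1))) (fun k => k))
        (pvS_pairwise_lt all_tags)
        (PySem.List.sorted_ofList_pairwise_lt _)
        (by intro k
            simp [PySem.List.mem_sorted, PySem.Set.mem_ofList, List.mem_map, pvSmem all_tags])]
  simp only [PySem.Dict.keys_foldl_modify_key, PySem.Dict.keys_empty, pvUpdate_nil_eq_ofList,
    PySem.Dict.getD_foldl_modify_append, PySem.Dict.getD_empty, List.nil_append,
    PySem.List.foldl_append_eq_flatMap, List.flatMap_map]
  congr 1
  have hK : (PySem.List.sorted (PySem.Set.ofList (List.map Prod.fst all_tags)) fun v => v)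
      = (PySem.List.sorted (PySem.Set.ofList (List.map (fun p => p.1) all_tags)) fun k => k) := rfl
  rw [hK]
  refine congrFun (congrArg _ ?_) _
  funext k
  rw [pvValues_eq]

-- ===== VERDICT (by name: the statement is the Claim_ definition above) =====
theorem generate_create_tag_statements_spec : Claim_equal_generate_create_tag_statements := by
  intro all_tags _
  unfold Spec_generate_create_tag_statements
  exact pvMain all_tags
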